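-- pv_equiv track=rewrite | github.com/sueszli/vector-database-benchmark | dataset/python-mutated/aes.py | shift_block
-- ===== SOURCE A (Python) =====
-- def shift_block(data):
--     if False:
--         while True:
--             i = 10
--     data_shifted = []
--     bit = 0
--     for n in data:
--         if bit:
--             n |= 256
--         bit = n & 1
--         n >>= 1
--         data_shifted.append(n)
--     return data_shifted
-- ===== SOURCE B (Python) =====
-- def shift_block(data):
--     data = list(data)
--     carries = [0] + [n & 1 for n in data]
--     return [(n >> 1) | (128 if c else 0) for n, c in zip(data, carries)]
-- ===== Notes on version B (the rewrite author's own statement) =====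
-- stated objective: alternative
-- what changed: Replaces the loop-carried carry state with a precomputed carry table (the low bit of each predecessor) and builds the result as one independent per-element map over zip(data, carries), using (n | 256) >> 1 == (n >> 1) | 128.
import Mathlib
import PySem

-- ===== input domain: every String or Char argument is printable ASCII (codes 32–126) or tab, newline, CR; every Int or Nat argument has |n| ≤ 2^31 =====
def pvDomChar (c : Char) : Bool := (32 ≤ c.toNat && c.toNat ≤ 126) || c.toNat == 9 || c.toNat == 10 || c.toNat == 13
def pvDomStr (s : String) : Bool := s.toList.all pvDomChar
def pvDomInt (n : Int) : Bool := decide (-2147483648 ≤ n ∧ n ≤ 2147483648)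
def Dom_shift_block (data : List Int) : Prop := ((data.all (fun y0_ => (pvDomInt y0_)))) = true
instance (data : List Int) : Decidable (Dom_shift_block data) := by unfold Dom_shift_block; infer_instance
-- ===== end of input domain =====

-- B replaces A's loop-carried carry bit with a precomputed carry table and an
-- independent per-element map over zip(data, carries); same O(n) cost, different decomposition.


-- ===== PORT A =====
-- one loop iteration of A: carry in 'or's 256 in, new carry is the low bit, then shift right
def shiftStep (st : List Int × Int) (n : Int) : List Int × Int :=
  let n1 := if st.2 ≠ 0 then PySem.Int.bor n 256 else n
  let bit := PySem.Int.band n1 1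
  (st.1 ++ [n1 >>> (1 : Nat)], bit)

def shift_block (data : List Int) : List Int :=
  (data.foldl shiftStep ([], 0)).1

-- ===== PORT B =====
-- per-element computation of B: (n >> 1) | (128 if c else 0)
def shiftElem (p : Int × Int) : Int :=
  PySem.Int.bor (p.1 >>> (1 : Nat)) (if p.2 ≠ 0 then 128 else 0)

def shift_block_alt (data : List Int) : List Int :=
  let carries : List Int := 0 :: data.map (fun n => PySem.Int.band n 1)
  (data.zip carries).map shiftElem

-- ===== PRECONDITION & SPEC =====
def Spec_shift_block (data : List Int) (out : List Int) : Prop := out = shift_block_alt data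
instance (data : List Int) (out : List Int) : Decidable (Spec_shift_block data out) := by unfold Spec_shift_block; infer_instance

-- ===== CLAIM (what is proved, stated in full; the proofs are below) =====
def Claim_equal_shift_block : Prop := ∀ (data : List Int), Dom_shift_block data → Spec_shift_block data (shift_block data)

-- ===== LEMMAS AND PROOFS =====

-- Nat-level bit facts specific to the |256 / &1 / >>1 / |128 combination
lemma nat_or256_and1 (m : Nat) : (m ||| 256) &&& 1 = m &&& 1 := by
  apply Nat.eq_of_testBit_eq; intro i
  simp only [Nat.testBit_and, Nat.testBit_lor]
  by_cases h : i = 0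
  · subst h; simp [show (256 : Nat).testBit 0 = false from by decide]
  · rw [show (1 : Nat) = 2 ^ 0 from (pow_zero 2).symm, Nat.testBit_two_pow]
    simp [Ne.symm h]

lemma nat_or256_shr (m : Nat) : (m ||| 256) >>> 1 = (m >>> 1) ||| 128 := by
  apply Nat.eq_of_testBit_eq; intro i
  simp only [Nat.testBit_shiftRight, Nat.testBit_lor]
  have h : (256 : Nat).testBit (1 + i) = (128 : Nat).testBit i := by
    rw [show (256 : Nat) = 2 ^ 8 from rfl, show (128 : Nat) = 2 ^ 7 from rfl,
        Nat.testBit_two_pow, Nat.testBit_two_pow]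
    simp; omega
  rw [h]

lemma nat_and256_bit (m : Nat) : m &&& 256 = (m.testBit 8).toNat * 256 := by
  rw [show (256 : Nat) = 2 ^ 8 from rfl, Nat.and_two_pow]

lemma nat_sub256_and1 (m : Nat) : 1 &&& (m - (m &&& 256)) = 1 &&& m := by
  have hle : m &&& 256 ≤ m := Nat.and_le_left
  rw [Nat.and_comm 1 _, Nat.and_comm 1 m, Nat.and_one_is_mod, Nat.and_one_is_mod,
      nat_and256_bit]
  rw [nat_and256_bit] at hle
  cases hb : m.testBit 8 <;> simp [hb] at hle ⊢ <;> omega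

lemma nat_sub256_shr (m : Nat) :
    (m - (m &&& 256)) >>> 1 = (m >>> 1) - ((m >>> 1) &&& 128) := by
  have hle : m &&& 256 ≤ m := Nat.and_le_left
  have h128 : (m >>> 1) &&& 128 = (m.testBit 8).toNat * 128 := by
    rw [show (128 : Nat) = 2 ^ 7 from rfl, Nat.and_two_pow, Nat.testBit_shiftRight]
  rw [nat_and256_bit] at hle ⊢
  rw [h128, Nat.shiftRight_eq_div_pow, Nat.shiftRight_eq_div_pow, pow_one]
  cases hb : m.testBit 8 <;> simp [hb] at hle ⊢ <;> omega

-- normal forms of PySem bit-ops on the two Int constructors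
lemma bor_ofNat (m k : Nat) : PySem.Int.bor (Int.ofNat m) (Int.ofNat k) = Int.ofNat (m ||| k) := by
  simp [PySem.Int.bor]

lemma bor_negSucc (m k : Nat) :
    PySem.Int.bor (Int.negSucc m) (Int.ofNat k) = Int.negSucc (m - (m &&& k)) := by
  simp [PySem.Int.bor, Int.negSucc_eq, show ¬((m : Int) ≤ -1) from by omega]
  omega

lemma band_ofNat_one (m : Nat) : PySem.Int.band (Int.ofNat m) 1 = Int.ofNat (m &&& 1) := by
  simp [PySem.Int.band]

lemma band_negSucc_one (m : Nat) :
    PySem.Int.band (Int.negSucc m) 1 = Int.ofNat (1 - (1 &&& m)) := by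
  simp [PySem.Int.band, Int.negSucc_eq, show ¬((m : Int) ≤ -1) from by omega, Nat.and_comm 1 m]

-- the two Int-level identities the equivalence rests on
lemma band_bor256_one (n : Int) :
    PySem.Int.band (PySem.Int.bor n 256) 1 = PySem.Int.band n 1 := by
  cases n with
  | ofNat m =>
    rw [show (256 : Int) = Int.ofNat 256 from rfl, bor_ofNat, band_ofNat_one,
        band_ofNat_one, nat_or256_and1]
  | negSucc m =>
    rw [show (256 : Int) = Int.ofNat 256 from rfl, bor_negSucc, band_negSucc_one,
        band_negSucc_one, nat_sub256_and1]

lemma bor256_shr (n : Int) :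
    (PySem.Int.bor n 256) >>> (1 : Nat) = PySem.Int.bor (n >>> (1 : Nat)) 128 := by
  cases n with
  | ofNat m =>
    rw [show (256 : Int) = Int.ofNat 256 from rfl, bor_ofNat]
    show Int.ofNat ((m ||| 256) >>> 1) = _
    rw [show Int.ofNat m >>> (1 : Nat) = Int.ofNat (m >>> 1) from rfl,
        show (128 : Int) = Int.ofNat 128 from rfl, bor_ofNat, nat_or256_shr]
  | negSucc m =>
    rw [show (256 : Int) = Int.ofNat 256 from rfl, bor_negSucc]
    show Int.negSucc ((m - (m &&& 256)) >>> 1) = _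
    rw [show Int.negSucc m >>> (1 : Nat) = Int.negSucc (m >>> 1) from rfl,
        show (128 : Int) = Int.ofNat 128 from rfl, bor_negSucc, nat_sub256_shr]

-- the head element A produces equals B's per-element value
lemma step_head (n bit : Int) :
    (if bit ≠ 0 then PySem.Int.bor n 256 else n) >>> (1 : Nat) = shiftElem (n, bit) := by
  by_cases hb : bit ≠ 0 <;> simp [shiftElem, hb, bor256_shr]

-- the carry A threads equals B's table entry
lemma step_carry (n bit : Int) :
    PySem.Int.band (if bit ≠ 0 then PySem.Int.bor n 256 else n) 1 = PySem.Int.band n 1 := by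
  by_cases hb : bit ≠ 0 <;> simp [hb, band_bor256_one]

-- A's fold, started with any accumulator and carry, is B's zip-map
lemma fold_eq_zip (data : List Int) : ∀ (acc : List Int) (bit : Int),
    (data.foldl shiftStep (acc, bit)).1
      = acc ++ (data.zip (bit :: data.map (fun n => PySem.Int.band n 1))).map shiftElem := by
  induction data with
  | nil => intro acc bit; simp
  | cons n rest ih =>
    intro acc bit
    simp only [List.foldl_cons, List.map_cons, List.zip_cons_cons, List.map]
    show (rest.foldl shiftStep (shiftStep (acc, bit) n)).1 = _
    rw [show shiftStep (acc, bit) n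
          = (acc ++ [(if bit ≠ 0 then PySem.Int.bor n 256 else n) >>> (1 : Nat)],
             PySem.Int.band (if bit ≠ 0 then PySem.Int.bor n 256 else n) 1) from rfl,
        ih, step_carry, step_head]
    simp

-- ===== VERDICT (by name: the statement is the Claim_ definition above) =====
theorem shift_block_spec : Claim_equal_shift_block := by
  intro data _
  show shift_block data = shift_block_alt data
  rw [shift_block, fold_eq_zip]
  rfl
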